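-- pv_equiv track=rewrite | github.com/XyzHuy/-DL-Fine-tuning-coding-model | data/solution/Solution2067.py | equalCountSubstrings
-- ===== SOURCE A (Python) =====
-- def equalCountSubstrings(s: str, count: int) -> int:
--     def is_valid(counter):
--         for val in counter.values():
--             if val != 0 and val != count:
--                 return False
--         return True
--
--     n = len(s)
--     total = 0
--
--     # Check for substrings with exactly 'num_unique' unique characters
--     for num_unique in range(1, 27):  # There are 26 lowercase English letters
--         # Sliding window size
--         window_size = num_unique * count
--         if window_size > n:
--             break
--
--         # Initialize counter for the first window
--         from collections import Counter
--         counter = Counter(s[:window_size])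
--
--         if is_valid(counter):
--             total += 1
--
--         # Slide the window over the string
--         for i in range(window_size, n):
--             counter[s[i]] += 1
--             counter[s[i - window_size]] -= 1
--
--             # Remove the count from dictionary if it drops to zero
--             if counter[s[i - window_size]] == 0:
--                 del counter[s[i - window_size]]
--
--             if is_valid(counter):
--                 total += 1
--
--     return total
-- ===== SOURCE B (Python) =====
-- def _shift(freq, c, delta, count):
--     # Update freq[c] by delta; return the change in the number of "bad" keys
--     # (keys whose count is neither 0 nor `count`).
--     v = freq.get(c, 0)
--     w = v + delta
--     freq[c] = w
--     return (1 if w != 0 and w != count else 0) - (1 if v != 0 and v != count else 0)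
--
--
-- def equalCountSubstrings(s: str, count: int) -> int:
--     n = len(s)
--     if count <= 0:
--         return 0
--     total = 0
--     for k in range(1, 27):  # at most 26 distinct lowercase letters
--         w = k * count
--         if w > n:
--             break
--         freq = {}
--         bad = 0
--         for c in s[:w]:
--             bad += _shift(freq, c, 1, count)
--         if bad == 0:
--             total += 1
--         for i in range(w, n):
--             bad += _shift(freq, s[i], 1, count)
--             bad += _shift(freq, s[i - w], -1, count)
--             if bad == 0:
--                 total += 1
--     return total
-- ===== Notes on version B (the rewrite author's own statement) =====
-- stated objective: alternative
-- what changed: B replaces A's per-window O(alphabet) is_valid scan over the whole Counter (and its delete-on-zero bookkeeping) by an incrementally maintained integer 'bad' counting keys whose frequency is neither 0 nor count, so each window is validated in O(1).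
-- outside the precondition, e.g. on equalCountSubstrings('ab', 0): A returns 78, B returns 0
-- crash fix: For every count < 0 A raises IndexError (s[i - window_size] is past the end of s, or s[i] on an empty string); B returns 0. — e.g. on equalCountSubstrings("a", -2): A raises IndexError, B returns 0
import Mathlib
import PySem

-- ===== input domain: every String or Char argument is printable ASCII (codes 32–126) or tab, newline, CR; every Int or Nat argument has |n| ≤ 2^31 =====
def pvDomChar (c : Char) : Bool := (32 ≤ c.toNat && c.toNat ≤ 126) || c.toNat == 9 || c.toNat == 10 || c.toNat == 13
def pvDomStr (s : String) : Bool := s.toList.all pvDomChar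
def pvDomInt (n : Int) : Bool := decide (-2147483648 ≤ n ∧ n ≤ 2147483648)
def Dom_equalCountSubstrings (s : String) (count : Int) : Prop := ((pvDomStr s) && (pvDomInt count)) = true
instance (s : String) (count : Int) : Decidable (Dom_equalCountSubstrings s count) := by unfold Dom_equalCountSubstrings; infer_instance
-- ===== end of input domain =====

-- B replaces A's per-window scan of all counter values (is_valid) by an incrementally
-- maintained count of "bad" keys, validating each window in O(1); exact on count >= 1.


-- ===== PORT A =====
-- is_valid: all counter values are 0 or count
def pvIsValidA (count : Int) (counter : PySem.Dict Char Int) : Bool :=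
  counter.values.all (fun val => val == 0 || val == count)

-- one iteration of A's sliding loop: add s[i], remove s[i-w] (delete on zero), test window
def pvStepA (l : List Char) (count w : Int) (st : PySem.Dict Char Int × Int) (i : Int) :
    PySem.Dict Char Int × Int :=
  let c := PySem.List.pyGetD l i ' '
  let d1 := st.1.insert c (st.1.getD c 0 + 1)
  let cold := PySem.List.pyGetD l (i - w) ' '
  let d2 := d1.insert cold (d1.getD cold 0 - 1)
  let d3 := if d2.getD cold 0 == 0 then d2.erase cold else d2
  (d3, if pvIsValidA count d3 then st.2 + 1 else st.2)

-- A's outer loop over num_unique = 1..26 with break when window_size > n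
def pvOuterA (l : List Char) (count n : Int) : List Int → Int → Int
  | [], total => total
  | k :: ks, total =>
    let w := k * count
    if w > n then total
    else
      let counter := PySem.Dict.counter (PySem.List.slice l none (some w))
      let total1 := if pvIsValidA count counter then total + 1 else total
      let st := (PySem.List.pyRange w n 1).foldl (pvStepA l count w) (counter, total1)
      pvOuterA l count n ks st.2

def equalCountSubstrings (s : String) (count : Int) : Int :=
  pvOuterA s.toList count (PySem.Str.len s) (PySem.List.pyRange 1 27 1) 0

-- ===== PORT B =====
-- 1 if v is a "bad" frequency (neither 0 nor count) else 0
def pvContrib (count v : Int) : Int := if v ≠ 0 ∧ v ≠ count then 1 else 0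

-- _shift: bump freq[c] by delta, folding the returned bad-delta into the carried bad counter
def pvShiftB (count : Int) (st : PySem.Dict Char Int × Int) (c : Char) (delta : Int) :
    PySem.Dict Char Int × Int :=
  let v := st.1.getD c 0
  let w := v + delta
  (st.1.insert c w, st.2 + (pvContrib count w - pvContrib count v))

-- one iteration of B's sliding loop: two _shift calls, then the O(1) bad == 0 test
def pvStepB (l : List Char) (count w : Int) (st : (PySem.Dict Char Int × Int) × Int) (i : Int) :
    (PySem.Dict Char Int × Int) × Int :=
  let fb1 := pvShiftB count st.1 (PySem.List.pyGetD l i ' ') 1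
  let fb2 := pvShiftB count fb1 (PySem.List.pyGetD l (i - w) ' ') (-1)
  (fb2, if fb2.2 == 0 then st.2 + 1 else st.2)

def pvOuterB (l : List Char) (count n : Int) : List Int → Int → Int
  | [], total => total
  | k :: ks, total =>
    let w := k * count
    if w > n then total
    else
      let fb := (PySem.List.slice l none (some w)).foldl
        (fun st c => pvShiftB count st c 1) (PySem.Dict.empty, 0)
      let total1 := if fb.2 == 0 then total + 1 else total
      let st := (PySem.List.pyRange w n 1).foldl (pvStepB l count w) (fb, total1)
      pvOuterB l count n ks st.2

def equalCountSubstrings_alt (s : String) (count : Int) : Int :=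
  if count ≤ 0 then 0
  else pvOuterB s.toList count (PySem.Str.len s) (PySem.List.pyRange 1 27 1) 0

-- ===== PRECONDITION & SPEC =====
-- Pre_ restricts to the function's natural domain 1 ≤ count: for count = 0 A's windows have
-- size 0 and it returns 26*(len(s)+1), an artefact of zero-size sliding windows (B returns 0),
-- and for every count < 0 A raises IndexError.
def Pre_equalCountSubstrings (s : String) (count : Int) : Prop := 1 ≤ count
instance (s : String) (count : Int) : Decidable (Pre_equalCountSubstrings s count) := by
  unfold Pre_equalCountSubstrings; infer_instance

def pvWitness_equalCountSubstrings : String × Int := ("aabb", 2)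

-- For every count < 0 A raises IndexError (s[i - window_size] is past the end of s, or s[i]
-- on an empty string); B returns 0.  Checked by equalCountSubstrings_raises at the bottom.
def Raises_equalCountSubstrings (s : String) (count : Int) : Prop := count < 0
instance (s : String) (count : Int) : Decidable (Raises_equalCountSubstrings s count) := by
  unfold Raises_equalCountSubstrings; infer_instance

def pvRaiseWitness_equalCountSubstrings : String × Int := ("a", -2)
def pvRaiseWitnessOut_equalCountSubstrings : Int := 0

def Spec_equalCountSubstrings (s : String) (count : Int) (out : Int) : Prop :=
  out = equalCountSubstrings_alt s count
instance (s : String) (count : Int) (out : Int) : Decidable (Spec_equalCountSubstrings s count out) := by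
  unfold Spec_equalCountSubstrings; infer_instance

-- ===== CLAIM (what is proved, stated in full; the proofs are below) =====
def Claim_equal_equalCountSubstrings : Prop := ∀ (s : String) (count : Int),
  Dom_equalCountSubstrings s count → Pre_equalCountSubstrings s count →
  Spec_equalCountSubstrings s count (equalCountSubstrings s count)

def Claim_raises_equalCountSubstrings : Prop :=
  (∀ (s : String) (count : Int), Dom_equalCountSubstrings s count →
    Raises_equalCountSubstrings s count → ¬ Pre_equalCountSubstrings s count) ∧
  (Dom_equalCountSubstrings (pvRaiseWitness_equalCountSubstrings.1) (pvRaiseWitness_equalCountSubstrings.2) ∧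
   Raises_equalCountSubstrings (pvRaiseWitness_equalCountSubstrings.1) (pvRaiseWitness_equalCountSubstrings.2) ∧
   equalCountSubstrings_alt (pvRaiseWitness_equalCountSubstrings.1) (pvRaiseWitness_equalCountSubstrings.2) = pvRaiseWitnessOut_equalCountSubstrings)

-- ===== LEMMAS AND PROOFS =====

-- "bad" predicate: a frequency that is neither 0 nor count
def pvBadP (count : Int) : Int → Bool := fun v => decide (v ≠ 0 ∧ v ≠ count)

-- the coupling invariant: A's counter and B's (freq, bad) describe the same window
def pvInv (count : Int) (dA dB : PySem.Dict Char Int) (bad : Int) : Prop :=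
  (∀ x, dA.getD x 0 = dB.getD x 0) ∧ dA.keys.Nodup ∧ dB.keys.Nodup ∧
  bad = ((dB.values.countP (pvBadP count)) : Int)

lemma pvFind?_filter_ne (l : List (Char × Int)) (c x : Char) :
    (l.filter (fun p => !(p.1 == c))).find? (fun p => p.1 == x)
      = if x = c then none else l.find? (fun p => p.1 == x) := by
  induction l with
  | nil => simp
  | cons p rest ih =>
    by_cases hpc : p.1 = c
    · by_cases hxc : x = c <;> simp [hpc, hxc, ih, Ne.symm]
    · by_cases hpx : p.1 = x
      · have hxc : ¬ x = c := by rw [← hpx]; exact hpc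
        simp [hpx, hxc]
      · simp [hpc, hpx, ih]

lemma pvGet?_erase (d : PySem.Dict Char Int) (c x : Char) :
    (d.erase c).get? x = if x = c then none else d.get? x := by
  obtain ⟨l⟩ := d
  show ((l.filter (fun p => !(p.1 == c))).find? (fun p => p.1 == x)).map Prod.snd = _
  rw [pvFind?_filter_ne]
  by_cases hxc : x = c <;> simp [hxc] <;> rfl

lemma pvGetD_erase (d : PySem.Dict Char Int) (c x : Char) :
    (d.erase c).getD x 0 = if x = c then 0 else d.getD x 0 := by
  rw [PySem.Dict.getD_eq_get?_getD, pvGet?_erase]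
  by_cases hxc : x = c <;> simp [hxc, PySem.Dict.getD_eq_get?_getD]

lemma pvNodup_keys_erase (d : PySem.Dict Char Int) (c : Char) (h : d.keys.Nodup) :
    (d.erase c).keys.Nodup := by
  have hs : List.Sublist ((d.items.filter (fun p => !(p.1 == c))).map Prod.fst)
      (d.items.map Prod.fst) := List.Sublist.map _ List.filter_sublist
  exact hs.nodup h

lemma pvAll_getD (P : Int → Bool) (hP0 : P 0 = true) (d : PySem.Dict Char Int)
    (hnd : d.keys.Nodup) :
    (d.values.all P = true) ↔ ∀ x, P (d.getD x 0) = true := by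
  constructor
  · intro hall x
    cases hg : d.get? x with
    | none => rw [PySem.Dict.getD_eq_get?_getD, hg]; exact hP0
    | some v =>
      rw [PySem.Dict.getD_of_get?_eq_some d 0 hg]
      have hv : v ∈ d.values := by
        have := PySem.Dict.mem_items_of_get?_eq_some d hg
        exact List.mem_map.mpr ⟨(x, v), this, rfl⟩
      exact List.all_eq_true.mp hall v hv
  · intro hx
    refine List.all_eq_true.mpr ?_
    intro v hv
    obtain ⟨p, hp, hpv⟩ := List.mem_map.mp hv
    have : d.getD p.1 0 = p.2 := PySem.Dict.getD_of_mem_items d (by simpa using hp) hnd 0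
    rw [← hpv, ← this]; exact hx p.1

lemma pvCountP_insert (P : Int → Bool) (hP0 : P 0 = false) (d : PySem.Dict Char Int)
    (hnd : d.keys.Nodup) (c : Char) (w : Int) :
    ((d.insert c w).values.countP P) + (if P (d.getD c 0) then 1 else 0)
      = d.values.countP P + (if P w then 1 else 0) := by
  by_cases hc : d.contains c
  · have hmem : c ∈ d.items.map Prod.fst := by
      have := (PySem.Dict.contains_iff_mem_keys d c).mp hc
      simpa [PySem.Dict.keys] using this
    obtain ⟨p, hp, hpc⟩ := List.mem_map.mp hmem
    obtain ⟨l1, l2, hsplit⟩ := List.append_of_mem hp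
    have hnd' : (l1.map Prod.fst ++ p.1 :: l2.map Prod.fst).Nodup := by
      have : (d.items.map Prod.fst).Nodup := by simpa [PySem.Dict.keys] using hnd
      rw [hsplit] at this; simpa using this
    rw [List.nodup_append] at hnd'
    have hc1 : c ∉ l1.map Prod.fst := by
      intro h
      exact (hnd'.2.2 c h p.1 (by simp)) hpc.symm
    have hc2 : c ∉ l2.map Prod.fst := by
      rw [← hpc]; exact (List.nodup_cons.mp hnd'.2.1).1
    have hgd : d.getD c 0 = p.2 := by
      refine PySem.Dict.getD_of_mem_items d ?_ hnd 0
      rw [hsplit]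
      have : p = (c, p.2) := by rw [← hpc]
      rw [← this]; simp
    have hmap1 : l1.map (fun q => if (q.1 == c) = true then (c, w) else q) = l1 := by
      refine List.map_congr_left ?_ |>.trans l1.map_id
      intro q hq
      have : ¬ (q.1 = c) := fun h => hc1 (h ▸ List.mem_map.mpr ⟨q, hq, rfl⟩)
      simp [this]
    have hmap2 : l2.map (fun q => if (q.1 == c) = true then (c, w) else q) = l2 := by
      refine List.map_congr_left ?_ |>.trans l2.map_id
      intro q hq
      have : ¬ (q.1 = c) := fun h => hc2 (h ▸ List.mem_map.mpr ⟨q, hq, rfl⟩)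
      simp [this]
    have hvals : (d.insert c w).values = l1.map Prod.snd ++ w :: l2.map Prod.snd := by
      show ((d.insert c w).items).map Prod.snd = _
      rw [PySem.Dict.items_insert_of_contains d w hc, hsplit]
      simp only [List.map_append, List.map_cons, hmap1, hmap2]
      simp [hpc]
    have hvals0 : d.values = l1.map Prod.snd ++ p.2 :: l2.map Prod.snd := by
      show (d.items).map Prod.snd = _
      rw [hsplit]; simp
    rw [hvals, hvals0, hgd, List.countP_append, List.countP_append, List.countP_cons,
      List.countP_cons]
    by_cases hw : P w = true <;> by_cases hp2 : P p.2 = true <;>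
      simp [hw, hp2] <;> omega
  · have hne : d.contains c = false := by simpa using hc
    rw [PySem.Dict.getD_of_not_contains d 0 hne]
    have : (d.insert c w).values = d.values ++ [w] := by
      show ((d.insert c w).items).map Prod.snd = _
      rw [PySem.Dict.items_insert_of_not_contains d w hne]
      simp [PySem.Dict.values]
    rw [this, List.countP_append, hP0]
    simp [List.countP_cons]

theorem pvInv_empty (count : Int) : pvInv count PySem.Dict.empty PySem.Dict.empty 0 :=
  ⟨fun _ => rfl, PySem.Dict.nodup_keys_empty, PySem.Dict.nodup_keys_empty, rfl⟩

theorem pvContrib_eq_ite (count v : Int) :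
    pvContrib count v = if pvBadP count v = true then (1:Int) else 0 := by
  simp [pvContrib, pvBadP]

theorem pvInv_shift (count : Int) {dA dB : PySem.Dict Char Int} {bad : Int}
    (h : pvInv count dA dB bad) (c : Char) (delta : Int) :
    pvInv count (dA.insert c (dA.getD c 0 + delta))
      ((pvShiftB count (dB, bad) c delta).1) ((pvShiftB count (dB, bad) c delta).2) := by
  obtain ⟨ha, hndA, hndB, hbad⟩ := h
  have hP0 : pvBadP count 0 = false := by simp [pvBadP]
  refine ⟨?_, PySem.Dict.nodup_keys_insert _ _ _ hndA,
    PySem.Dict.nodup_keys_insert _ _ _ hndB, ?_⟩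
  · intro x
    simp only [pvShiftB]
    rw [PySem.Dict.getD_insert, PySem.Dict.getD_insert]
    by_cases hx : x = c <;> simp [hx, ha c, ha x]
  · have hcnt := pvCountP_insert (pvBadP count) hP0 dB hndB c (dB.getD c 0 + delta)
    simp only [pvShiftB]
    rw [pvContrib_eq_ite, pvContrib_eq_ite, hbad]
    cases h1 : pvBadP count (dB.getD c 0 + delta) <;> cases h2 : pvBadP count (dB.getD c 0) <;>
      simp only [h1, h2, if_true, Bool.false_eq_true, if_false] at hcnt ⊢ <;> omega

theorem pvInv_sub_erase (count : Int) {dA dB : PySem.Dict Char Int} {bad : Int}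
    (h : pvInv count dA dB bad) (c : Char) :
    pvInv count
      (if (dA.insert c (dA.getD c 0 - 1)).getD c 0 == 0
        then (dA.insert c (dA.getD c 0 - 1)).erase c else dA.insert c (dA.getD c 0 - 1))
      ((pvShiftB count (dB, bad) c (-1)).1) ((pvShiftB count (dB, bad) c (-1)).2) := by
  have hbase := pvInv_shift count h c (-1)
  rw [show dA.getD c 0 + (-1) = dA.getD c 0 - 1 by ring] at hbase
  by_cases hz : (dA.insert c (dA.getD c 0 - 1)).getD c 0 = 0
  · obtain ⟨ha, hndA, hndB, hbad⟩ := hbase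
    rw [if_pos (by simpa using hz)]
    refine ⟨?_, pvNodup_keys_erase _ _ hndA, hndB, hbad⟩
    intro x
    rw [pvGetD_erase]
    by_cases hx : x = c
    · rw [if_pos hx, hx, ← ha c, hz]
    · rw [if_neg hx]; exact ha x
  · rw [if_neg (by simpa using hz)]
    exact hbase

theorem pvValid_iff (count : Int) {dA dB : PySem.Dict Char Int} {bad : Int}
    (h : pvInv count dA dB bad) : pvIsValidA count dA = (bad == 0) := by
  obtain ⟨ha, hndA, hndB, hbad⟩ := h
  have hgood : ∀ v : Int, (v == 0 || v == count) = !(pvBadP count v) := by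
    intro v
    by_cases h0 : v = 0 <;> by_cases hc : v = count <;> simp [pvBadP, h0, hc]
  rw [Bool.eq_iff_iff]
  have hA := pvAll_getD (fun v => v == 0 || v == count) (by simp) dA hndA
  have hB := pvAll_getD (fun v => v == 0 || v == count) (by simp) dB hndB
  constructor
  · intro hv
    have hall : ∀ x, ((dB.getD x 0 == 0 || dB.getD x 0 == count)) = true := by
      intro x; rw [← ha x]; exact hA.mp hv x
    have : dB.values.all (fun v => v == 0 || v == count) = true := hB.mpr hall
    have hzero : dB.values.countP (pvBadP count) = 0 := by
      refine List.countP_eq_zero.mpr ?_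
      intro v hvv
      have := List.all_eq_true.mp this v hvv
      rw [hgood v] at this
      simp at this; simp [this]
    simp [hbad, hzero]
  · intro hb
    have hbad0 : bad = 0 := by simpa using hb
    have hzero : dB.values.countP (pvBadP count) = 0 := by
      rw [hbad0] at hbad; exact_mod_cast hbad.symm
    have hallB : dB.values.all (fun v => v == 0 || v == count) = true := by
      refine List.all_eq_true.mpr ?_
      intro v hv
      have := List.countP_eq_zero.mp hzero v hv
      rw [hgood v]; simpa using this
    refine hA.mpr ?_
    intro x; rw [ha x]; exact hB.mp hallB x

theorem pvInv_step (l : List Char) (count w : Int) {dA dB : PySem.Dict Char Int} {bad t : Int}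
    (h : pvInv count dA dB bad) (i : Int) :
    (pvStepA l count w (dA, t) i).2 = (pvStepB l count w ((dB, bad), t) i).2 ∧
    pvInv count (pvStepA l count w (dA, t) i).1
      (pvStepB l count w ((dB, bad), t) i).1.1 (pvStepB l count w ((dB, bad), t) i).1.2 := by
  have h1 := pvInv_shift count h (PySem.List.pyGetD l i ' ') 1
  rcases hB1 : pvShiftB count (dB, bad) (PySem.List.pyGetD l i ' ') 1 with ⟨dB1, bad1⟩
  rw [hB1] at h1
  have h2 := pvInv_sub_erase count h1 (PySem.List.pyGetD l (i - w) ' ')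
  rcases hB2 : pvShiftB count (dB1, bad1) (PySem.List.pyGetD l (i - w) ' ') (-1) with ⟨dB2, bad2⟩
  rw [hB2] at h2
  have hval := pvValid_iff count h2
  constructor
  · simp only [pvStepA, pvStepB, hB1]
    rw [hB2]
    simp only [hval]
  · simp only [pvStepA, pvStepB, hB1]
    rw [hB2]
    exact h2

theorem pvFold_build_aux (count : Int) (cs : List Char) :
    ∀ {dA dB : PySem.Dict Char Int} {bad : Int}, pvInv count dA dB bad →
    pvInv count (cs.foldl (fun d x => d.insert x (d.getD x 0 + 1)) dA)
      ((cs.foldl (fun st c => pvShiftB count st c 1) (dB, bad)).1)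
      ((cs.foldl (fun st c => pvShiftB count st c 1) (dB, bad)).2) := by
  induction cs with
  | nil => intro _ _ _ h; exact h
  | cons c cs ih =>
    intro dA dB bad h
    rw [List.foldl_cons, List.foldl_cons]
    have h1 := pvInv_shift count h c 1
    rcases hB : pvShiftB count (dB, bad) c 1 with ⟨dB1, bad1⟩
    rw [hB] at h1
    exact ih h1

theorem pvFold_build (count : Int) (cs : List Char) :
    pvInv count (PySem.Dict.counter cs)
      ((cs.foldl (fun st c => pvShiftB count st c 1) (PySem.Dict.empty, 0)).1)
      ((cs.foldl (fun st c => pvShiftB count st c 1) (PySem.Dict.empty, 0)).2) := by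
  rw [← PySem.Dict.foldl_insert_getD_add_one_eq_counter]
  exact pvFold_build_aux count cs (pvInv_empty count)

theorem pvFold_slide (l : List Char) (count w : Int) (is : List Int) :
    ∀ {dA dB : PySem.Dict Char Int} {bad : Int} (t : Int), pvInv count dA dB bad →
    (is.foldl (pvStepA l count w) (dA, t)).2 =
      (is.foldl (pvStepB l count w) ((dB, bad), t)).2 := by
  induction is with
  | nil => intro _ _ _ t _; rfl
  | cons i is ih =>
    intro dA dB bad t h
    have h' := pvInv_step l count w (t := t) h i
    rcases hA : pvStepA l count w (dA, t) i with ⟨dA1, tA⟩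
    rcases hB : pvStepB l count w ((dB, bad), t) i with ⟨⟨dB1, bad1⟩, tB⟩
    rw [hA, hB] at h'
    obtain ⟨hteq, hinv⟩ := h'
    simp only at hteq
    rw [List.foldl_cons, List.foldl_cons, hA, hB, hteq]
    exact ih tB hinv

theorem pvOuter_eq (l : List Char) (count n : Int) (ks : List Int) :
    ∀ (t : Int), pvOuterA l count n ks t = pvOuterB l count n ks t := by
  induction ks with
  | nil => intro t; rfl
  | cons k ks ih =>
    intro t
    show (if k * count > n then t else _) = (if k * count > n then t else _)
    by_cases hw : k * count > n
    · rw [if_pos hw, if_pos hw]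
    · rw [if_neg hw, if_neg hw]
      have hbuild := pvFold_build count (PySem.List.slice l none (some (k * count)))
      rcases hFB : (PySem.List.slice l none (some (k * count))).foldl
          (fun st c => pvShiftB count st c 1) (PySem.Dict.empty, 0) with ⟨dB0, bad0⟩
      rw [hFB] at hbuild
      have hval := pvValid_iff count hbuild
      rw [hval]
      have hslide := pvFold_slide l count (k * count) (PySem.List.pyRange (k * count) n 1)
        (if (bad0 == 0) then t + 1 else t) hbuild
      rw [hslide]
      exact ih _

-- ===== VERDICT (by name: the statement is the Claim_ definition above) =====
theorem equalCountSubstrings_spec : Claim_equal_equalCountSubstrings := by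
  intro s count _ hpre
  unfold Spec_equalCountSubstrings equalCountSubstrings equalCountSubstrings_alt
  have : ¬ count ≤ 0 := by unfold Pre_equalCountSubstrings at hpre; omega
  rw [if_neg this]
  exact pvOuter_eq _ _ _ _ _

theorem equalCountSubstrings_raises : Claim_raises_equalCountSubstrings := by
  unfold Claim_raises_equalCountSubstrings
  constructor
  · intro s count _ hr
    unfold Raises_equalCountSubstrings at hr
    unfold Pre_equalCountSubstrings
    omega
  · exact ⟨by decide, by decide, by decide⟩

-- self-check: B's port indeed returns 0 at the raise-region witness (uses equalCountSubstrings_raises)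
theorem pvRaiseWitness_ok :
    Raises_equalCountSubstrings (pvRaiseWitness_equalCountSubstrings.1) (pvRaiseWitness_equalCountSubstrings.2) ∧
    equalCountSubstrings_alt (pvRaiseWitness_equalCountSubstrings.1) (pvRaiseWitness_equalCountSubstrings.2) = pvRaiseWitnessOut_equalCountSubstrings :=
  equalCountSubstrings_raises.2.2
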